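-- pv_equiv track=rewrite | github.com/tottinge/gitminer-jupyter | numstat_parser.py | read_whole_commit
-- ===== SOURCE A (Python) =====
-- def read_whole_commit(source):
--     """
--     Gitlogs are weird. sometimes they forget to add
--     newlines, sometimes they leave out sections, and
--     sometimes they are just a little wrong one way or another
--     So, we read commit-to-commit first.
--     """
--     holding = []
--     for line in source:
--         if line.startswith('commit'):
--             if holding:
--                 yield holding
--                 holding = []
--         holding.append(line)
--     if holding:
--         yield holding
-- ===== SOURCE B (Python) =====
-- def read_whole_commit(source):
--     # Slice-based: find how many lines the current group spans, yield it, advance.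
--     source = list(source)
--     while source:
--         n = 1
--         for line in source[1:]:
--             if line.startswith('commit'):
--                 break
--             n += 1
--         yield source[:n]
--         source = source[n:]
-- ===== Notes on version B (the rewrite author's own statement) =====
-- stated objective: alternative
-- what changed: Replaces the stateful holding-buffer/yield-then-reset accumulator with a slice-based grouper that measures each group's length (first line plus the following non-'commit' lines) and emits source[:n], advancing by n.
import Mathlib
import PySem

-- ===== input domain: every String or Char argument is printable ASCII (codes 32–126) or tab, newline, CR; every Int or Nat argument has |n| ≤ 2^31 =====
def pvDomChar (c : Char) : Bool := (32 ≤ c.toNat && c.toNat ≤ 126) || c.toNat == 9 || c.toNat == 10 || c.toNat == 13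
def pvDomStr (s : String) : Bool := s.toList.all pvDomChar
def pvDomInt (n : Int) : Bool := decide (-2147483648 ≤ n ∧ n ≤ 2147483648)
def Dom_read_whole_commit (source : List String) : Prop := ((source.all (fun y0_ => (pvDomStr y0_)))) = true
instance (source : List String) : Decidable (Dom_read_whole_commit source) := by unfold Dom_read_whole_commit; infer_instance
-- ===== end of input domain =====

-- B replaces A's holding-buffer accumulator with a slice-based grouper (measure the group length, emit the slice, advance); same cost, alternative structure.

-- ===== PORT A =====
-- A's generator loop over `source` with state (holding, yielded-so-far), as structural recursion.
def rwcLoop (source holding : List String) (acc : List (List String)) : List (List String) :=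
  match source with
  | [] => if holding ≠ [] then acc ++ [holding] else acc
  | line :: rest =>
    if PySem.Str.startswith line "commit" then
      if holding ≠ [] then rwcLoop rest [line] (acc ++ [holding])
      else rwcLoop rest (holding ++ [line]) acc
    else rwcLoop rest (holding ++ [line]) acc

def read_whole_commit (source : List String) : List (List String) :=
  rwcLoop source [] []

-- ===== PORT B =====
-- the inner `for line in source[1:] … n += 1` counting loop of Source B
def rwcCount (lines : List String) : Nat :=
  match lines with
  | [] => 0
  | l :: ls => if PySem.Str.startswith l "commit" then 0 else 1 + rwcCount ls

-- Source B's outer while loop: n ≥ 1, source[:n] = take n, source[n:] = drop n (n nonnegative, so slices are take/drop)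
def read_whole_commit_alt : List String → List (List String)
  | [] => []
  | l :: rest =>
    let n : Nat := 1 + rwcCount rest
    ((l :: rest).take n) :: read_whole_commit_alt ((l :: rest).drop n)
termination_by s => s.length
decreasing_by simp [List.length_drop]

-- ===== PRECONDITION & SPEC =====
def Spec_read_whole_commit (source : List String) (out : List (List String)) : Prop := out = read_whole_commit_alt source
instance (source : List String) (out : List (List String)) : Decidable (Spec_read_whole_commit source out) := by unfold Spec_read_whole_commit; infer_instance

-- ===== CLAIM (what is proved, stated in full; the proofs are below) =====
def Claim_equal_read_whole_commit : Prop := ∀ (source : List String), Dom_read_whole_commit source → Spec_read_whole_commit source (read_whole_commit source)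

-- ===== LEMMAS AND PROOFS =====

theorem alt_nil : read_whole_commit_alt [] = [] := by
  rw [read_whole_commit_alt]

theorem alt_cons (l : String) (rest : List String) :
    read_whole_commit_alt (l :: rest) =
      (l :: rest.take (rwcCount rest)) :: read_whole_commit_alt (rest.drop (rwcCount rest)) := by
  conv_lhs => rw [read_whole_commit_alt.eq_def]
  simp [Nat.add_comm 1 (rwcCount rest), List.take_succ_cons, List.drop_succ_cons]

theorem rwcLoop_acc (source : List String) : ∀ holding acc,
    rwcLoop source holding acc = acc ++ rwcLoop source holding [] := by
  induction source with
  | nil => intro h acc; simp [rwcLoop]; split <;> simp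
  | cons line rest ih =>
    intro h acc
    simp only [rwcLoop]
    split
    · split
      · rw [ih [line] (acc ++ [h]), ih [line] ([] ++ [h])]; simp
      · rw [ih (h ++ [line]) acc]
    · rw [ih (h ++ [line]) acc]

theorem rwcLoop_main (source : List String) : ∀ holding, holding ≠ [] →
    rwcLoop source holding [] =
      (holding ++ source.take (rwcCount source)) :: read_whole_commit_alt (source.drop (rwcCount source)) := by
  induction source with
  | nil => intro h hh; simp [rwcLoop, rwcCount, alt_nil, hh]
  | cons line rest ih =>
    intro h hh
    by_cases hc : PySem.Str.startswith line "commit"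
    · have hcount : rwcCount (line :: rest) = 0 := by
        simp only [rwcCount]; rw [if_pos hc]
      simp only [rwcLoop]
      rw [if_pos hc, if_pos hh, rwcLoop_acc rest [line], ih [line] (by simp), hcount]
      simp [alt_cons]
    · have hcount : rwcCount (line :: rest) = rwcCount rest + 1 := by
        simp only [rwcCount]; rw [if_neg hc]; omega
      simp only [rwcLoop]
      rw [if_neg hc, ih (h ++ [line]) (by simp), hcount]
      simp [List.take_succ_cons, List.drop_succ_cons]

-- ===== VERDICT (by name: the statement is the Claim_ definition above) =====
theorem read_whole_commit_spec : Claim_equal_read_whole_commit := by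
  intro source _
  unfold Spec_read_whole_commit read_whole_commit
  cases source with
  | nil => simp [rwcLoop, alt_nil]
  | cons line rest =>
    have hstep : rwcLoop (line :: rest) [] [] = rwcLoop rest [line] [] := by
      simp only [rwcLoop]; split <;> simp
    rw [hstep, rwcLoop_main rest [line] (by simp), alt_cons]
    simp
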